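-- pv_equiv track=rewrite | github.com/TheEvergreenStateCollege/upper-division-cs-24-25 | rl-25wi/examples/mdp.py | labelunitorthogonals
-- ===== SOURCE A (Python) =====
-- from itertools import accumulate, product, repeat
-- from typing import (
--     Any, Callable, Dict, Iterator, List, FrozenSet, NewType, Self,
--     Sequence, Tuple, Union
--     )
--
-- def zerotuple(n: int):
--   return tuple(repeat(0, n))
--
-- def orthogonalneighbors(
--   origin: Sequence[int]
-- ) -> FrozenSet[Tuple[int]]:
--   neighborhood = []
--   for i in range(len(origin)):
--     up = list(origin)
--     up[i] = up[i] + 1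
--     down = list(origin)
--     down[i] = down[i] - 1
--     neighborhood.append(tuple(up))
--     neighborhood.append(tuple(down))
--   return neighborhood
--
-- DIRECTIONS = [
--     ('right', 'left'),
--     ('up', 'down'),
--     ('in', 'out'),
--     ('before', 'after')
-- ]
--
-- def labelunitorthogonals(
--   n: int,
--   labels: Sequence[Sequence[str]] = DIRECTIONS
-- ):
--   origin = zerotuple(n)
--   orthovectors = orthogonalneighbors(origin)
--   # Sequence[1::2] means start at index 1 and take every 2nd item after
--   oppositepairs = list(zip(orthovectors[::2], orthovectors[1::2]))
--   ortholabelmap = {}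
--   # Normally we'd prefer zip to explicitly iterate the lists rather
--   # than using an index value to find the elements indirectly, but we
--   # have an extra use for i - generating labels procedurally
--   for i in range(n):
--     up, down = oppositepairs[i]
--     if i < len(labels):
--       ulabel, dlabel = labels[i]
--     else:
--       ulabel = 'd' + f'{i:0{n}}' + 'plus'
--       dlabel = 'd' + f'{i:0{n}}' + 'minus'
--     ortholabelmap[up] = ulabel
--     ortholabelmap[down] = dlabel
--   return ortholabelmap
-- ===== SOURCE B (Python) =====
-- def labelunitorthogonals(n, labels=[('right','left'),('up','down'),('in','out'),('before','after')]):
--   # Recursive back-to-front construction: each dimension's pair of unit vectors is built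
--   # by tuple concatenation and the deeper dimensions' dict is merged in afterwards.
--   def go(i):
--     if i >= n:
--       return {}
--     if i < len(labels):
--       ulabel, dlabel = labels[i]
--     else:
--       pad = str(i).zfill(n)
--       ulabel, dlabel = 'd' + pad + 'plus', 'd' + pad + 'minus'
--     before = (0,) * i
--     after = (0,) * (n - 1 - i)
--     d = {before + (1,) + after: ulabel, before + (-1,) + after: dlabel}
--     d.update(go(i + 1))
--     return d
--   return go(0)
-- ===== Notes on version B (the rewrite author's own statement) =====
-- stated objective: alternative
-- what changed: B replaces A's iterative build-all-neighbors list, [::2]/[1::2] slicing, zip and index-driven labelling loop by a recursive function that builds each dimension's two unit vectors by tuple concatenation and merges the recursively built dict of the deeper dimensions via dict.update, back-to-front.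
import Mathlib
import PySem

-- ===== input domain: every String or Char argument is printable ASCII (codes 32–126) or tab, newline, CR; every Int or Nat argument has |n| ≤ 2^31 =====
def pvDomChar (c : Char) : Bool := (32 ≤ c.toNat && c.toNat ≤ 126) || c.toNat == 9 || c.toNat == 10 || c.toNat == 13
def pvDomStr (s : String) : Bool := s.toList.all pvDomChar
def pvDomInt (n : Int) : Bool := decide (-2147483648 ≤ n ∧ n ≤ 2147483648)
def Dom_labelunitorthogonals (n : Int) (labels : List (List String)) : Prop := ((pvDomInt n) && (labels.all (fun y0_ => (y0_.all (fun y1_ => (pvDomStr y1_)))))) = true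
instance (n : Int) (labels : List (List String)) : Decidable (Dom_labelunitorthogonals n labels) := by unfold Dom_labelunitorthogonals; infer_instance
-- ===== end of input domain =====

-- B replaces A's build-all-neighbors / slice / zip / index-loop pipeline by a recursive
-- back-to-front construction merging dicts (objective: alternative). Equal return values on Pre_.

-- ===== PORT A =====

-- zerotuple(n) = tuple(repeat(0, n))
def pvZerotuple (n : Int) : List Int := List.replicate n.toNat 0

-- orthogonalneighbors: neighborhood = []; for i in range(len(origin)): append up_i, down_i
def pvOrthogonalneighbors (origin : List Int) : List (List Int) :=
  (PySem.List.pyRange 0 (PySem.List.len origin) 1).foldl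
    (fun acc i =>
      let up := PySem.List.pySetD origin i (PySem.List.pyGetD origin i 0 + 1)
      let down := PySem.List.pySetD origin i (PySem.List.pyGetD origin i 0 - 1)
      (acc ++ [up]) ++ [down])
    []

-- f'{i:0{n}}' for nonnegative i and width n equals str(i) zero-padded: PySem.Str.zfill (exact)
def pvPad (i n : Int) : String := PySem.Str.zfill (PySem.Int.toStr i) n

def labelunitorthogonals (n : Int) (labels : List (List String)) : List (List Int × String) :=
  let origin := pvZerotuple n
  let orthovectors := pvOrthogonalneighbors origin
  -- orthovectors[::2] and orthovectors[1::2]; step 2 ≠ 0, so slice? is never none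
  let evens := (PySem.List.slice? orthovectors none none 2).getD []
  let odds := (PySem.List.slice? orthovectors (some 1) none 2).getD []
  let oppositepairs := evens.zip odds
  ((PySem.List.pyRange 0 n 1).foldl
    (fun (d : PySem.Dict (List Int) String) i =>
      -- oppositepairs[i]: i ∈ range(n) is always in range, the default is never read
      let p := PySem.List.pyGetD oppositepairs i ([], [])
      let lab :=
        if i < PySem.List.len labels then
          -- 'ulabel, dlabel = labels[i]': Python raises ValueError unless the entry has length 2 (excluded by Pre_)
          match PySem.List.pyGetD labels i [] with
          | [u, dl] => (u, dl)
          | _ => ("", "")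
        else
          ("d" ++ pvPad i n ++ "plus", "d" ++ pvPad i n ++ "minus")
      (d.insert p.1 lab.1).insert p.2 lab.2)
    PySem.Dict.empty).items

-- ===== PORT B =====
-- go(i): recursive; builds dimension i's two unit vectors by concatenation, then merges go(i+1) via dict.update
def pvAltGo (n : Int) (labels : List (List String)) (i : Int) : PySem.Dict (List Int) String :=
  if h : n ≤ i then PySem.Dict.empty
  else
    let lab :=
      if i < PySem.List.len labels then
        -- 'ulabel, dlabel = labels[i]': raises unless the entry has length 2 (excluded by Pre_)
        let pair := PySem.List.pyGetD labels i []
        (pair.getD 0 "", pair.getD 1 "")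
      else
        -- pad = str(i).zfill(n) (exact)
        let pad := PySem.Str.zfill (PySem.Int.toStr i) n
        ("d" ++ pad ++ "plus", "d" ++ pad ++ "minus")
    let before := List.replicate i.toNat (0 : Int)
    let after := List.replicate (n - 1 - i).toNat (0 : Int)
    let d := (PySem.Dict.empty.insert (before ++ [1] ++ after) lab.1).insert (before ++ [-1] ++ after) lab.2
    -- d.update(go(i+1))
    d.update (pvAltGo n labels (i + 1)).items
termination_by (n - i).toNat
decreasing_by omega

def labelunitorthogonals_alt (n : Int) (labels : List (List String)) : List (List Int × String) :=
  (pvAltGo n labels 0).items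

-- ===== PRECONDITION & SPEC =====
-- Pre_ excludes exactly the inputs on which Python A raises ValueError: a labels entry that is
-- actually unpacked (its index is below n) whose length is not 2; B raises there too.
def Pre_labelunitorthogonals (n : Int) (labels : List (List String)) : Prop :=
  ∀ l ∈ labels.take n.toNat, l.length = 2
instance (n : Int) (labels : List (List String)) : Decidable (Pre_labelunitorthogonals n labels) := by unfold Pre_labelunitorthogonals; infer_instance

def pvWitness_labelunitorthogonals : Int × List (List String) :=
  (3, [["right", "left"], ["up", "down"], ["in", "out"], ["before", "after"]])

def Spec_labelunitorthogonals (n : Int) (labels : List (List String)) (out : List (List Int × String)) : Prop := out = labelunitorthogonals_alt n labels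
instance (n : Int) (labels : List (List String)) (out : List (List Int × String)) : Decidable (Spec_labelunitorthogonals n labels out) := by unfold Spec_labelunitorthogonals; infer_instance

-- ===== CLAIM (what is proved, stated in full; the proofs are below) =====
def Claim_equal_labelunitorthogonals : Prop := ∀ (n : Int) (labels : List (List String)), Dom_labelunitorthogonals n labels → Pre_labelunitorthogonals n labels → Spec_labelunitorthogonals n labels (labelunitorthogonals n labels)

-- ===== LEMMAS AND PROOFS =====

-- the unit vector with v at index k, and the label pair at dimension k
def pvKey (m k : Nat) (v : Int) : List Int := (List.replicate m (0 : Int)).set k v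

def pvLab (m : Nat) (labels : List (List String)) (k : Nat) : String × String :=
  if (k : Int) < PySem.List.len labels then
    match PySem.List.pyGetD labels (k : Int) [] with
    | [u, dl] => (u, dl)
    | _ => ("", "")
  else
    ("d" ++ PySem.Str.zfill (PySem.Int.toStr (k : Int)) (m : Int) ++ "plus",
     "d" ++ PySem.Str.zfill (PySem.Int.toStr (k : Int)) (m : Int) ++ "minus")

-- the common normal form: the items list, dimension by dimension
def pvL (m : Nat) (labels : List (List String)) (ks : List Nat) : List (List Int × String) :=
  ks.flatMap (fun k => [(pvKey m k 1, (pvLab m labels k).1), (pvKey m k (-1), (pvLab m labels k).2)])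

lemma pvKey_inj {m k k' : Nat} (hk : k < m) (hk' : k' < m) {v v' : Int}
    (hv : v ≠ 0) (hv' : v' ≠ 0) (h : pvKey m k v = pvKey m k' v') : k = k' ∧ v = v' := by
  by_cases hkk : k = k'
  · subst hkk
    refine ⟨rfl, ?_⟩
    have := congrArg (fun l => l[k]?) h
    simpa [pvKey, List.getElem?_set, hk] using this
  · exfalso
    have := congrArg (fun l => l[k]?) h
    simp [pvKey, List.getElem?_set, hk, hk', Ne.symm hkk] at this
    exact hv this

lemma pvKeys_nodup (m : Nat) (ks : List Nat) (hks : ks.Nodup) (hlt : ∀ k ∈ ks, k < m) :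
    (ks.flatMap (fun k => [pvKey m k 1, pvKey m k (-1)])).Nodup := by
  induction ks with
  | nil => simp
  | cons a t ih =>
    have ha : a < m := hlt a (by simp)
    have hat : a ∉ t := (List.nodup_cons.mp hks).1
    have hnd : t.Nodup := (List.nodup_cons.mp hks).2
    simp only [List.flatMap_cons, List.cons_append, List.singleton_append, List.nodup_cons]
    refine ⟨?_, ?_, ih hnd (fun k hk => hlt k (by simp [hk]))⟩
    · intro hmem
      rw [List.mem_cons] at hmem
      rcases hmem with h1 | h1
      · exact absurd ((pvKey_inj ha ha (by norm_num) (by norm_num) h1).2) (by norm_num)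
      · rcases List.mem_flatMap.mp h1 with ⟨b, hb, hb2⟩
        have hbm : b < m := hlt b (by simp [hb])
        simp only [List.mem_cons, List.not_mem_nil, or_false] at hb2
        rcases hb2 with h2 | h2
        · exact hat (((pvKey_inj ha hbm (by norm_num) (by norm_num) h2).1 ▸ hb))
        · exact absurd ((pvKey_inj ha hbm (by norm_num) (by norm_num) h2).2) (by norm_num)
    · intro hmem
      rcases List.mem_flatMap.mp hmem with ⟨b, hb, hb2⟩
      have hbm : b < m := hlt b (by simp [hb])
      simp only [List.mem_cons, List.not_mem_nil, or_false] at hb2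
      rcases hb2 with h2 | h2
      · exact absurd ((pvKey_inj ha hbm (by norm_num) (by norm_num) h2).2) (by norm_num)
      · exact hat (((pvKey_inj ha hbm (by norm_num) (by norm_num) h2).1 ▸ hb))

lemma pvL_map_fst (m : Nat) (labels : List (List String)) (ks : List Nat) :
    (pvL m labels ks).map Prod.fst = ks.flatMap (fun k => [pvKey m k 1, pvKey m k (-1)]) := by
  simp [pvL, List.map_flatMap]

-- a loop inserting two keys per step is the single-insert loop over the flattened pair list
lemma pvFoldl_insert2 {κ ν β : Type} [BEq κ] (ks : List β) (k1 k2 : β → κ) (v1 v2 : β → ν)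
    (d : PySem.Dict κ ν) :
    ks.foldl (fun d b => (d.insert (k1 b) (v1 b)).insert (k2 b) (v2 b)) d
      = (ks.flatMap (fun b => [((k1 b, v1 b) : κ × ν), (k2 b, v2 b)])).foldl
          (fun d p => d.insert p.1 p.2) d := by
  induction ks generalizing d with
  | nil => rfl
  | cons a t ih => simp [List.flatMap_cons, ih]

-- even/odd entries of the interleaved list [p₀.1, p₀.2, p₁.1, p₁.2, …]
lemma pvFlat_getElem_even {α : Type} (L : List (α × α)) (d : α × α) (k : Nat) (hk : k < L.length) :
    (L.flatMap (fun p => [p.1, p.2]))[2 * k]? = some (L.getD k d).1 := by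
  induction L generalizing k with
  | nil => simp at hk
  | cons p L ih =>
    cases k with
    | zero => simp [List.flatMap_cons]
    | succ k =>
      have : 2 * (k + 1) = (2 * k) + 1 + 1 := by ring
      simp only [List.flatMap_cons, this, List.getD_cons_succ]
      exact ih k (by simpa using hk)

lemma pvFlat_getElem_odd {α : Type} (L : List (α × α)) (d : α × α) (k : Nat) (hk : k < L.length) :
    (L.flatMap (fun p => [p.1, p.2]))[2 * k + 1]? = some (L.getD k d).2 := by
  induction L generalizing k with
  | nil => simp at hk
  | cons p L ih =>
    cases k with
    | zero => simp [List.flatMap_cons]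
    | succ k =>
      have : 2 * (k + 1) + 1 = (2 * k + 1) + 1 + 1 := by ring
      simp only [List.flatMap_cons, this, List.getD_cons_succ]
      exact ih k (by simpa using hk)

-- xs[::2] of the interleaved list is the list of first components
lemma pvSlice_even {α : Type} [Inhabited α] (L : List (α × α)) :
    PySem.List.slice? (L.flatMap (fun p => [p.1, p.2])) none none 2 = some (L.map Prod.fst) := by
  have hlen : (L.flatMap (fun p => [p.1, p.2])).length = 2 * L.length := by
    induction L with
    | nil => simp
    | cons p L ih => simp [List.flatMap_cons, ih]; omega
  simp only [PySem.List.slice?, PySem.List.sliceIndices, hlen]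
  norm_num
  have hcount : ((2 * (L.length : Int) + 2 - 1) / 2).toNat = L.length := by omega
  rcases Nat.eq_zero_or_pos L.length with h0 | hpos
  · simp [List.length_eq_zero_iff.mp h0]
  · simp only [hcount, hpos, if_true]
    have key : ∀ k ∈ List.range L.length,
        (L.flatMap (fun p => [p.1, p.2]))[(2 * (k : Int)).toNat]? =
          some ((L.getD k default).1) := by
      intro k hk
      have h2 : (2 * (k : Int)).toNat = 2 * k := by omega
      rw [h2]
      exact pvFlat_getElem_even L default k (List.mem_range.mp hk)
    rw [List.filterMap_congr key,
        show (fun x => some (L.getD x default).1) = some ∘ (fun x => (L.getD x default).1) from rfl,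
        List.filterMap_eq_map]
    apply List.ext_getElem (by simp)
    intro i h1 h2
    simp [List.getElem?_eq_getElem (show i < L.length by simpa using h2)]

-- xs[1::2] of the interleaved list is the list of second components
lemma pvSlice_odd {α : Type} [Inhabited α] (L : List (α × α)) :
    PySem.List.slice? (L.flatMap (fun p => [p.1, p.2])) (some 1) none 2 = some (L.map Prod.snd) := by
  have hlen : (L.flatMap (fun p => [p.1, p.2])).length = 2 * L.length := by
    induction L with
    | nil => simp
    | cons p L ih => simp [List.flatMap_cons, ih]; omega
  rcases Nat.eq_zero_or_pos L.length with h0 | hpos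
  · simp [List.length_eq_zero_iff.mp h0]; rfl
  · simp only [PySem.List.slice?, PySem.List.sliceIndices, hlen]
    norm_num
    have hmin : min (1 : Int) (2 * (L.length : Int)) = 1 := by omega
    have h1lt : (1 : Int) < 2 * (L.length : Int) := by omega
    simp only [hmin, if_pos h1lt]
    have hcount : ((2 * (L.length : Int) - 1 + 2 - 1) / 2).toNat = L.length := by omega
    simp only [hcount]
    have key : ∀ k ∈ List.range L.length,
        (L.flatMap (fun p => [p.1, p.2]))[(1 + 2 * (k : Int)).toNat]? =
          some ((L.getD k default).2) := by
      intro k hk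
      have h2 : (1 + 2 * (k : Int)).toNat = 2 * k + 1 := by omega
      rw [h2]
      exact pvFlat_getElem_odd L default k (List.mem_range.mp hk)
    rw [List.filterMap_congr key,
        show (fun x => some (L.getD x default).2) = some ∘ (fun x => (L.getD x default).2) from rfl,
        List.filterMap_eq_map]
    apply List.ext_getElem (by simp)
    intro i h1 h2
    simp [List.getElem?_eq_getElem (show i < L.length by simpa using h2)]

-- A's orthovectors over the zero origin, in paired closed form
lemma pvOrth_eq (m : Nat) :
    pvOrthogonalneighbors (List.replicate m (0 : Int))
      = ((List.range m).map (fun k => (pvKey m k 1, pvKey m k (-1)))).flatMap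
          (fun p => [p.1, p.2]) := by
  unfold pvOrthogonalneighbors
  have hbody : ∀ (acc : List (List Int)) (i : Int), i ∈ PySem.List.pyRange 0 (PySem.List.len (List.replicate m (0:Int))) 1 →
      (acc ++ [PySem.List.pySetD (List.replicate m (0:Int)) i (PySem.List.pyGetD (List.replicate m (0:Int)) i 0 + 1)]) ++
        [PySem.List.pySetD (List.replicate m (0:Int)) i (PySem.List.pyGetD (List.replicate m (0:Int)) i 0 - 1)]
      = acc ++ ((fun i => [PySem.List.pySetD (List.replicate m (0:Int)) i (PySem.List.pyGetD (List.replicate m (0:Int)) i 0 + 1),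
           PySem.List.pySetD (List.replicate m (0:Int)) i (PySem.List.pyGetD (List.replicate m (0:Int)) i 0 - 1)]) i) := by
    intro acc i _; simp
  rw [PySem.List.foldl_congr_mem _ _ _ _ hbody, PySem.List.foldl_append_eq_flatMap]
  have hr : PySem.List.pyRange 0 (PySem.List.len (List.replicate m (0 : Int))) 1
      = List.map (fun k : Nat => (k : Int)) (List.range m) := by
    rw [PySem.List.len_eq, List.length_replicate]
    exact PySem.List.pyRange_zero_nat m
  rw [hr, List.flatMap_map, List.flatMap_map]
  simp only [List.nil_append]
  apply List.flatMap_congr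
  intro k hk
  have hkm : k < m := List.mem_range.mp hk
  simp [pvKey, PySem.List.pySetD, PySem.List.pySet?, PySem.List.pyIdx?, hkm,
        PySem.List.pyGetD_natCast, List.getD_eq_getElem?_getD]

-- A's result is the normal form over range m
lemma pvA_items (m : Nat) (labels : List (List String)) :
    labelunitorthogonals (m : Int) labels = pvL m labels (List.range m) := by
  unfold labelunitorthogonals
  have hzero : pvZerotuple (m : Int) = List.replicate m (0 : Int) := by simp [pvZerotuple]
  have hpairs :
      ((PySem.List.slice? (pvOrthogonalneighbors (pvZerotuple (m : Int))) none none 2).getD []).zip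
        ((PySem.List.slice? (pvOrthogonalneighbors (pvZerotuple (m : Int))) (some 1) none 2).getD [])
      = (List.range m).map (fun k => (pvKey m k 1, pvKey m k (-1))) := by
    rw [hzero, pvOrth_eq m, pvSlice_even, pvSlice_odd]
    simp only [Option.getD_some]
    rw [List.zip_map']
    simp
  simp only [hpairs]
  have hbody : ∀ (d : PySem.Dict (List Int) String) (i : Int), i ∈ PySem.List.pyRange 0 (m : Int) 1 →
      (fun (d : PySem.Dict (List Int) String) i =>
        let p := PySem.List.pyGetD ((List.range m).map (fun k => (pvKey m k 1, pvKey m k (-1)))) i ([], [])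
        let lab :=
          if i < PySem.List.len labels then
            match PySem.List.pyGetD labels i [] with
            | [u, dl] => (u, dl)
            | _ => ("", "")
          else
            ("d" ++ pvPad i (m : Int) ++ "plus", "d" ++ pvPad i (m : Int) ++ "minus")
        (d.insert p.1 lab.1).insert p.2 lab.2) d i
      = (d.insert (pvKey m i.toNat 1) (pvLab m labels i.toNat).1).insert
          (pvKey m i.toNat (-1)) (pvLab m labels i.toNat).2 := by
    intro d i hi
    obtain ⟨hi0, hin⟩ := PySem.List.mem_pyRange_one.mp hi
    have hitoNat : ((i.toNat : Int)) = i := Int.toNat_of_nonneg hi0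
    have him : i.toNat < m := by omega
    have hget : PySem.List.pyGetD ((List.range m).map (fun k => (pvKey m k 1, pvKey m k (-1)))) i ([], [])
        = (pvKey m i.toNat 1, pvKey m i.toNat (-1)) := by
      rw [PySem.List.pyGetD_eq_getElem _ _ hi0 (by simpa using hin)]
      simp
    simp only [hget, pvLab, pvPad, hitoNat]
  rw [PySem.List.foldl_congr_mem _ _ _ _ hbody]
  rw [PySem.List.pyRange_zero_nat m, List.foldl_map]
  have hbody2 : ∀ (d : PySem.Dict (List Int) String) (k : Nat), k ∈ List.range m →
      (d.insert (pvKey m ((k : Int)).toNat 1) (pvLab m labels ((k : Int)).toNat).1).insert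
          (pvKey m ((k : Int)).toNat (-1)) (pvLab m labels ((k : Int)).toNat).2
      = (d.insert (pvKey m k 1) (pvLab m labels k).1).insert
          (pvKey m k (-1)) (pvLab m labels k).2 := by
    intro d k _; simp
  rw [PySem.List.foldl_congr_mem _ _ _ _ hbody2, pvFoldl_insert2]
  rw [PySem.Dict.items_foldl_insert_fresh _ Prod.fst Prod.snd _
    (by intro a _; exact PySem.Dict.contains_empty _)
    (by
        have h1 : ((List.range m).flatMap (fun k =>
            [((pvKey m k 1, (pvLab m labels k).1) : List Int × String),
             (pvKey m k (-1), (pvLab m labels k).2)])).map Prod.fst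
            = (List.range m).flatMap (fun k => [pvKey m k 1, pvKey m k (-1)]) := by
          simp [List.map_flatMap]
        rw [h1]
        exact pvKeys_nodup m (List.range m) (List.nodup_range) (fun k hk => List.mem_range.mp hk))]
  simp only [pvL]
  rw [show (PySem.Dict.empty : PySem.Dict (List Int) String).items = [] from rfl, List.nil_append]
  simp

-- B's recursion computes the normal form over the remaining dimensions
lemma pvAltGo_items (m : Nat) (labels : List (List String))
    (hpre : Pre_labelunitorthogonals (m : Int) labels) :
    ∀ (fuel i : Nat), i + fuel = m →
      (pvAltGo (m : Int) labels (i : Int)).items = pvL m labels (List.range' i fuel) := by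
  intro fuel
  induction fuel with
  | zero =>
    intro i hi
    rw [pvAltGo]
    rw [dif_pos (show (m : Int) ≤ (i : Int) by exact_mod_cast by omega)]
    simp [pvL]
    rfl
  | succ f ih =>
    intro i hi
    have him : i < m := by omega
    rw [pvAltGo, dif_neg (show ¬ (m : Int) ≤ (i : Int) by exact_mod_cast by omega)]
    -- the two keys built by concatenation are the set-form unit vectors
    have hkey : ∀ v : Int,
        List.replicate ((i : Int)).toNat (0 : Int) ++ [v] ++ List.replicate (((m : Int) - 1 - (i : Int))).toNat 0
          = pvKey m i v := by
      intro v
      have h1 : ((i : Int)).toNat = i := by simp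
      have h2 : (((m : Int) - 1 - (i : Int))).toNat = m - 1 - i := by omega
      rw [h1, h2]
      apply List.ext_getElem (by simp [pvKey]; omega)
      intro j hj1 hj2
      rcases lt_trichotomy j i with h | h | h
      · rw [List.getElem_append_left (by simp [h]; omega)]
        simp [pvKey, List.getElem_set, h, Nat.ne_of_gt h]
      · subst h
        rw [List.getElem_append_left (by simp), List.getElem_append_right (by simp)]
        simp [pvKey, him]
      · rw [List.getElem_append_right (by simp; omega)]
        simp only [pvKey, List.getElem_replicate, List.getElem_set, List.getElem_replicate]
        simp [Nat.ne_of_lt h]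
    -- the label pair matches pvLab (using Pre_ when the entry is unpacked)
    have hlab : (if (i : Int) < PySem.List.len labels then
          let pair := PySem.List.pyGetD labels (i : Int) []
          (pair.getD 0 "", pair.getD 1 "")
        else
          let pad := PySem.Str.zfill (PySem.Int.toStr (i : Int)) (m : Int)
          ("d" ++ pad ++ "plus", "d" ++ pad ++ "minus"))
        = pvLab m labels i := by
      unfold pvLab
      by_cases hc : (i : Int) < PySem.List.len labels
      · have hclen : i < labels.length := by rw [PySem.List.len_eq] at hc; omega
        have hl2 : (labels[i]).length = 2 := by
          apply hpre
          have htk : labels[i] = (labels.take ((m : Int)).toNat)[i]'(by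
              simp [List.length_take]; omega) := by simp [List.getElem_take]
          rw [htk]; exact List.getElem_mem _
        obtain ⟨u, dl, hudl⟩ := List.length_eq_two.mp hl2
        have hgetl : PySem.List.pyGetD labels (i : Int) ([] : List String) = [u, dl] := by
          rw [PySem.List.pyGetD_natCast, List.getD_eq_getElem?_getD,
              List.getElem?_eq_getElem hclen]
          simpa using hudl
        simp only [if_pos hc, hgetl]
        rfl
      · simp only [if_neg hc]
    simp only [hlab, hkey 1, hkey (-1)]
    -- the two-entry dict has distinct keys, so its items are the two pairs in order
    have hkne : pvKey m i (-1) ≠ pvKey m i 1 := by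
      intro h
      exact absurd ((pvKey_inj him him (by norm_num) (by norm_num) h).2) (by norm_num)
    have hd2 : ((PySem.Dict.empty.insert (pvKey m i 1) (pvLab m labels i).1).insert
          (pvKey m i (-1)) (pvLab m labels i).2).items
        = [(pvKey m i 1, (pvLab m labels i).1), (pvKey m i (-1), (pvLab m labels i).2)] := by
      rw [PySem.Dict.items_insert_of_not_contains, PySem.Dict.items_insert_of_not_contains]
      · rfl
      · exact PySem.Dict.contains_empty _
      · rw [PySem.Dict.contains_insert]
        simp [PySem.Dict.contains_empty, hkne]
    -- merging go(i+1)'s items appends them: all its keys are fresh and distinct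
    have hicast : ((i : Int) + 1) = ((i + 1 : Nat) : Int) := by push_cast; ring
    have hrest : (pvAltGo (m : Int) labels ((i : Int) + 1)).items
        = pvL m labels (List.range' (i + 1) f) := by
      rw [hicast]; exact ih (i + 1) (by omega)
    rw [PySem.Dict.update, hrest]
    have hmemkey : ∀ p ∈ pvL m labels (List.range' (i + 1) f),
        ∃ k v, p.1 = pvKey m k v ∧ i + 1 ≤ k ∧ k < m ∧ (v = 1 ∨ v = -1) := by
      intro p hp
      rcases List.mem_flatMap.mp hp with ⟨k, hk, hk2⟩
      have hkr : i + 1 ≤ k ∧ k < i + 1 + f := by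
        constructor
        · exact (List.mem_range'_1.mp hk).1
        · exact (List.mem_range'_1.mp hk).2
      simp only [List.mem_cons, List.not_mem_nil, or_false] at hk2
      rcases hk2 with h2 | h2
      · exact ⟨k, 1, by simp [h2], hkr.1, by omega, Or.inl rfl⟩
      · exact ⟨k, -1, by simp [h2], hkr.1, by omega, Or.inr rfl⟩
    rw [PySem.Dict.items_foldl_insert_fresh _ Prod.fst Prod.snd _
      (by
        intro p hp
        rcases hmemkey p hp with ⟨k, v, hpk, hk1, hkm, hv⟩
        have hvne : v ≠ 0 := by rcases hv with h | h <;> simp [h]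
        have hne1 : pvKey m k v ≠ pvKey m i 1 := by
          intro h; have := (pvKey_inj hkm him hvne (by norm_num) h).1; omega
        have hne2 : pvKey m k v ≠ pvKey m i (-1) := by
          intro h; have := (pvKey_inj hkm him hvne (by norm_num) h).1; omega
        rw [PySem.Dict.contains_insert, PySem.Dict.contains_insert]
        simp [PySem.Dict.contains_empty, hpk, hne1, hne2])
      (by
        rw [pvL_map_fst]
        exact pvKeys_nodup m _ (List.nodup_range' ) (fun k hk => by
          have := List.mem_range'_1.mp hk; omega))]
    rw [hd2]
    simp only [pvL, List.range'_succ, List.flatMap_cons]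
    simp

-- ===== VERDICT (by name: the statement is the Claim_ definition above) =====
theorem labelunitorthogonals_spec : Claim_equal_labelunitorthogonals := by
  intro n labels _ hpre
  unfold Spec_labelunitorthogonals labelunitorthogonals_alt
  rcases le_or_gt n 0 with hn | hn
  · rw [pvAltGo, dif_pos hn]
    unfold labelunitorthogonals
    rw [PySem.List.pyRange_one_eq_nil hn]
    rfl
  · obtain ⟨m, rfl⟩ : ∃ m : Nat, n = (m : Int) :=
      ⟨n.toNat, (Int.toNat_of_nonneg (le_of_lt hn)).symm⟩
    rw [pvA_items m labels,
        show ((0 : Int)) = ((0 : Nat) : Int) from rfl,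
        pvAltGo_items m labels hpre m 0 (by omega)]
    rw [List.range_eq_range']
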